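-- pv_equiv track=rewrite | github.com/pypi-data/pypi-mirror-367 | packages/iris-embedded-python-wrapper/iris_embedded_python_wrapper-0.2.5.tar.gz/iris_embedded_python_wrapper-0.2.5/iris_utils/_cli.py | _find_action_keys
-- ===== SOURCE A (Python) =====
-- from typing import Optional, Dict, List
--
-- def _find_action_keys(lines: List[str], offset: int) -> Dict[str, int]:
--     keys = {}
--     for i, line in enumerate(lines):
--         if line.startswith("ModifyConfig:PythonRuntimeLibrary="):
--             keys['runtime'] = i + offset
--         elif line.startswith("ModifyConfig:PythonPath="):
--             keys['path'] = i + offset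
--         elif line.startswith("ModifyConfig:PythonRuntimeLibraryVersion="):
--             keys['version'] = i + offset
--     return keys
-- ===== SOURCE B (Python) =====
-- def _key_of(line):
--     if line.startswith("ModifyConfig:PythonRuntimeLibrary="):
--         return "runtime"
--     if line.startswith("ModifyConfig:PythonPath="):
--         return "path"
--     if line.startswith("ModifyConfig:PythonRuntimeLibraryVersion="):
--         return "version"
--     return None
--
-- def _find_action_keys(lines, offset):
--     # staged group-by: tag every line once, keep the hits, then build the dict
--     # from the distinct keys (first-occurrence order) with each key's LAST value
--     hits = [(k, i + offset)
--             for i, line in enumerate(lines)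
--             for k in [_key_of(line)] if k is not None]
--     order = list(dict.fromkeys(k for k, _ in hits))
--     return {k: [v for k2, v in hits if k2 == k][-1] for k in order}
-- ===== Notes on version B (the rewrite author's own statement) =====
-- stated objective: alternative
-- what changed: Replaces the single-pass dict-update loop by a staged group-by pipeline: tag each line with its matched key, filter to the hits, dedup keys in first-occurrence order, and take each key's last value via comprehensions.
import Mathlib
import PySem

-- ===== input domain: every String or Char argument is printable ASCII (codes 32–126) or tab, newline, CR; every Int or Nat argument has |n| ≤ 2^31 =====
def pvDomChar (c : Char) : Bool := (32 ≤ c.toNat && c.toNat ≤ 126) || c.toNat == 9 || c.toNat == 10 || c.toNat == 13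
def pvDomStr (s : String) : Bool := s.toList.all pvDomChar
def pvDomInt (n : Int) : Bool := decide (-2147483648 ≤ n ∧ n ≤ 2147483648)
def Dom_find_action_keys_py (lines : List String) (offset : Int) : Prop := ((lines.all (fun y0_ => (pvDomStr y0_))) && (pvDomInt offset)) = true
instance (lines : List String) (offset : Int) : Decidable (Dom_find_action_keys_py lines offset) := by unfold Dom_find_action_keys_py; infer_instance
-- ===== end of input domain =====

-- B replaces A's single-pass dict-update loop by a staged group-by pipeline
-- (tag lines, filter hits, dedup keys in first-occurrence order, last value per key);
-- alternative decomposition, no speed claim.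

-- ===== PORT A =====
def find_action_keys_py (lines : List String) (offset : Int) : List (String × Int) :=
  ((PySem.List.enumerate lines).foldl (fun (keys : PySem.Dict String Int) p =>
    if PySem.Str.startswith p.2 "ModifyConfig:PythonRuntimeLibrary=" then
      keys.insert "runtime" (p.1 + offset)
    else if PySem.Str.startswith p.2 "ModifyConfig:PythonPath=" then
      keys.insert "path" (p.1 + offset)
    else if PySem.Str.startswith p.2 "ModifyConfig:PythonRuntimeLibraryVersion=" then
      keys.insert "version" (p.1 + offset)
    else keys) PySem.Dict.empty).items

-- ===== PORT B =====
-- helper _key_of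
def pvKeyOf (line : String) : Option String :=
  if PySem.Str.startswith line "ModifyConfig:PythonRuntimeLibrary=" then some "runtime"
  else if PySem.Str.startswith line "ModifyConfig:PythonPath=" then some "path"
  else if PySem.Str.startswith line "ModifyConfig:PythonRuntimeLibraryVersion=" then some "version"
  else none

-- hits: the tag-and-filter comprehension
def pvHits (lines : List String) (offset : Int) : List (String × Int) :=
  (PySem.List.enumerate lines).filterMap
    (fun p => (pvKeyOf p.2).map (fun k => (k, p.1 + offset)))

-- order = list(dict.fromkeys(...)): PySem.List.dedup (first occurrences, in order)
def pvOrder (lines : List String) (offset : Int) : List String :=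
  PySem.List.dedup ((pvHits lines offset).map Prod.fst)

-- the dict comprehension: 'order' has distinct keys, so the resulting dict's items
-- are exactly this map; [...][-1] via pyGetD (-1) (exact: the filtered list is
-- nonempty for every k in order, so Python's [-1] never raises)
def find_action_keys_py_alt (lines : List String) (offset : Int) : List (String × Int) :=
  (pvOrder lines offset).map (fun k =>
    (k, PySem.List.pyGetD (((pvHits lines offset).filter (fun q => q.1 == k)).map Prod.snd) (-1) 0))

-- ===== PRECONDITION & SPEC =====
def Spec_find_action_keys_py (lines : List String) (offset : Int) (out : List (String × Int)) : Prop := out = find_action_keys_py_alt lines offset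
instance (lines : List String) (offset : Int) (out : List (String × Int)) : Decidable (Spec_find_action_keys_py lines offset out) := by unfold Spec_find_action_keys_py; infer_instance

-- ===== CLAIM (what is proved, stated in full; the proofs are below) =====
def Claim_equal_find_action_keys_py : Prop := ∀ (lines : List String) (offset : Int), Dom_find_action_keys_py lines offset → Spec_find_action_keys_py lines offset (find_action_keys_py lines offset)

-- ===== LEMMAS AND PROOFS =====

-- A's if/elif step equals 'optional insert by pvKeyOf'
theorem pv_step_eq (offset : Int) (keys : PySem.Dict String Int) (p : Int × String) :
    (if PySem.Str.startswith p.2 "ModifyConfig:PythonRuntimeLibrary=" then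
      keys.insert "runtime" (p.1 + offset)
    else if PySem.Str.startswith p.2 "ModifyConfig:PythonPath=" then
      keys.insert "path" (p.1 + offset)
    else if PySem.Str.startswith p.2 "ModifyConfig:PythonRuntimeLibraryVersion=" then
      keys.insert "version" (p.1 + offset)
    else keys) =
    (match pvKeyOf p.2 with
      | some k => keys.insert k (p.1 + offset)
      | none => keys) := by
  unfold pvKeyOf; split_ifs <;> rfl

-- folding 'optional insert' equals folding plain insert over the filterMap of hits
theorem pv_foldl_filterMap (offset : Int) :
    ∀ (l : List (Int × String)) (d : PySem.Dict String Int),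
    l.foldl (fun d p => match pvKeyOf p.2 with
      | some k => d.insert k (p.1 + offset)
      | none => d) d =
    (l.filterMap (fun p => (pvKeyOf p.2).map (fun k => (k, p.1 + offset)))).foldl
      (fun d q => d.insert q.1 q.2) d := by
  intro l
  induction l with
  | nil => intro d; rfl
  | cons p t ih =>
    intro d
    cases h : pvKeyOf p.2 <;> simp [h, ih]

-- the value stored by a fold of inserts is the LAST value written for that key
theorem pv_getD_foldl_insert (k : String) (dflt : Int) :
    ∀ (l : List (String × Int)) (d : PySem.Dict String Int),
    (l.foldl (fun d q => d.insert q.1 q.2) d).getD k dflt =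
    ((l.filter (fun q => q.1 == k)).map Prod.snd).getLastD (d.getD k dflt) := by
  intro l
  induction l with
  | nil => intro d; rfl
  | cons q t ih =>
    intro d
    rw [List.foldl_cons, ih]
    by_cases h : q.1 = k
    · subst h
      rw [List.filter_cons_of_pos (by simp), List.map_cons, List.getLastD_cons,
        PySem.Dict.getD_insert_self]
    · rw [List.filter_cons_of_neg (by simp [h]),
        PySem.Dict.getD_insert_of_ne d q.2 dflt (Ne.symm h)]

-- ===== VERDICT (by name: the statement is the Claim_ definition above) =====
theorem find_action_keys_py_spec : Claim_equal_find_action_keys_py := by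
  intro lines offset _
  show _ = _
  unfold find_action_keys_py find_action_keys_py_alt pvOrder
  have hstep : (fun (keys : PySem.Dict String Int) (p : Int × String) =>
      if PySem.Str.startswith p.2 "ModifyConfig:PythonRuntimeLibrary=" then
        keys.insert "runtime" (p.1 + offset)
      else if PySem.Str.startswith p.2 "ModifyConfig:PythonPath=" then
        keys.insert "path" (p.1 + offset)
      else if PySem.Str.startswith p.2 "ModifyConfig:PythonRuntimeLibraryVersion=" then
        keys.insert "version" (p.1 + offset)
      else keys) = (fun keys p => match pvKeyOf p.2 with
        | some k => keys.insert k (p.1 + offset)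
        | none => keys) :=
    funext fun d => funext fun p => pv_step_eq offset d p
  rw [hstep, pv_foldl_filterMap]
  rw [show (PySem.List.enumerate lines).filterMap
      (fun p => (pvKeyOf p.2).map (fun k => (k, p.1 + offset))) = pvHits lines offset from rfl]
  set H := pvHits lines offset with hH
  set D := H.foldl (fun d q => d.insert q.1 q.2) PySem.Dict.empty with hD
  have hnd : D.keys.Nodup := by
    rw [hD]
    exact PySem.Dict.nodup_keys_foldl_insert_key H Prod.fst (fun d q => q.2)
      PySem.Dict.empty PySem.Dict.nodup_keys_empty
  have hkeys : D.keys = PySem.Set.ofList (H.map Prod.fst) := by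
    rw [hD]
    exact PySem.Dict.keys_foldl_insert_key (key := Prod.fst) (f := fun d q => q.2)
      (l := H) (d := PySem.Dict.empty)
  rw [PySem.Dict.items_eq_map_keys D hnd 0, hkeys]
  simp only [PySem.List.dedup_eq_ofList]
  apply List.map_congr_left
  intro k hk
  have hkmem : k ∈ H.map Prod.fst := by
    exact (PySem.Set.mem_ofList (H.map Prod.fst) k).mp hk
  have hne : (H.filter (fun q => q.1 == k)).map Prod.snd ≠ [] := by
    obtain ⟨q, hq, hq1⟩ := List.exists_of_mem_map hkmem
    intro hnil
    have : q ∈ H.filter (fun q => q.1 == k) := by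
      rw [List.mem_filter]; exact ⟨hq, by simp [hq1]⟩
    have : q.2 ∈ (H.filter (fun q => q.1 == k)).map Prod.snd := List.mem_map_of_mem this
    simp [hnil] at this
  rw [hD, pv_getD_foldl_insert, PySem.List.pyGetD_neg_one _ _ hne,
    List.getLastD_eq_getLast?, List.getLast?_eq_some_getLast hne, Option.getD_some]
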